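-- pv_equiv track=rewrite | github.com/cesarbruschetta/first-app-appengine | passwordgenerator.py | __process
-- ===== SOURCE A (Python) =====
-- BASE = ord('0')
--
-- def __process(aWord):
--     password = ""
--     if (len(aWord) >= 6):
--         for i in range(len(aWord)):
--             if i in [1, 5, 8, 13, 21]:
--                 password += chr(BASE+(ord(aWord[i])+i)%10)
--             else:
--                 password += aWord[i]
--     return password
-- ===== SOURCE B (Python) =====
-- BASE = ord('0')
--
-- def __process(aWord):
--     if len(aWord) < 6:
--         return ""
--     chars = list(aWord)
--     for i in (1, 5, 8, 13, 21):
--         if i < len(aWord):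
--             chars[i] = chr(BASE + (ord(aWord[i]) + i) % 10)
--     return "".join(chars)
-- ===== Notes on version B (the rewrite author's own statement) =====
-- stated objective: alternative
-- what changed: Instead of scanning every index and testing membership in [1,5,8,13,21], B copies the string into a list and directly patches only the (at most five) fixed positions that are in range, joining at the end.
import Mathlib
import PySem

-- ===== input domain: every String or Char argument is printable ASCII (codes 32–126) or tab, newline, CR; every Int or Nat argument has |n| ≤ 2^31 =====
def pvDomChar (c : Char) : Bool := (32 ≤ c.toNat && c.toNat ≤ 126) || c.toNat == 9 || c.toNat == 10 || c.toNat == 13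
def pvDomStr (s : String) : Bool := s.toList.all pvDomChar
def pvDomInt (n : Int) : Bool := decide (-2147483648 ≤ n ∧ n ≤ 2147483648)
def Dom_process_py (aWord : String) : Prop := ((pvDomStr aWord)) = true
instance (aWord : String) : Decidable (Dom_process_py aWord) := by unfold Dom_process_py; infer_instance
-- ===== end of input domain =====

-- B patches only the (at most five) fixed positions of a copied char list instead of
-- scanning every index with a membership test; alternative decomposition, same results.

-- BASE = ord('0')
def pvBASE : Nat := ('0').toNat

-- ===== PORT A =====
def process_py (aWord : String) : String :=
  let cs := aWord.toList
  if 6 ≤ cs.length then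
    String.ofList ((PySem.List.pyRange 0 (cs.length : Int) 1).foldl
      (fun password i =>
        if i = 1 ∨ i = 5 ∨ i = 8 ∨ i = 13 ∨ i = 21 then
          password ++ [Char.ofNat (pvBASE + ((PySem.List.pyGetD cs i ' ').toNat + i.toNat) % 10)]
        else
          password ++ [PySem.List.pyGetD cs i ' ']) [])
  else String.ofList []

-- ===== PORT B =====
-- chars[i] = chr(BASE + (ord(aWord[i]) + i) % 10), reading the ORIGINAL string
def pvShift (cs : List Char) (i : Nat) : Char :=
  Char.ofNat (pvBASE + ((cs.getD i ' ').toNat + i) % 10)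

def process_py_alt (aWord : String) : String :=
  let cs := aWord.toList
  if cs.length < 6 then ""
  else
    String.ofList (([1, 5, 8, 13, 21] : List Nat).foldl
      (fun chars i => if i < cs.length then chars.set i (pvShift cs i) else chars) cs)

-- ===== PRECONDITION & SPEC =====
def Spec_process_py (aWord : String) (out : String) : Prop := out = process_py_alt aWord
instance (aWord : String) (out : String) : Decidable (Spec_process_py aWord out) := by unfold Spec_process_py; infer_instance

-- ===== CLAIM (what is proved, stated in full; the proofs are below) =====
def Claim_equal_process_py : Prop := ∀ (aWord : String), Dom_process_py aWord → Spec_process_py aWord (process_py aWord)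

-- ===== LEMMAS AND PROOFS =====

-- A's loop body always appends one char: the fold is a map over the range.
theorem pvFoldlAppIf {α : Type} (C : α → Prop) [DecidablePred C] (x y : α → Char)
    (xs : List α) (acc : List Char) :
    xs.foldl (fun acc i => if C i then acc ++ [x i] else acc ++ [y i]) acc
      = acc ++ xs.map (fun i => if C i then x i else y i) := by
  induction xs generalizing acc with
  | nil => simp
  | cons a xs ih => by_cases h : C a <;> simp [h, ih]

-- Patching a fixed set of in-range positions, read elementwise.
theorem pvPatchGet (t : Nat → Char) (n : Nat) (ps : List Nat) (cs : List Char)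
    (hn : cs.length = n) (k : Nat) :
    (ps.foldl (fun l i => if i < n then l.set i (t i) else l) cs)[k]?
      = if k ∈ ps ∧ k < n then some (t k) else cs[k]? := by
  induction ps generalizing cs with
  | nil => simp
  | cons p ps ih =>
    simp only [List.foldl_cons]
    rw [ih _ (by split <;> simp [hn])]
    by_cases hmem : k ∈ ps ∧ k < n
    · simp [hmem]
    · simp only [if_neg hmem]
      by_cases hkp : k = p
      · subst hkp
        by_cases hk : k < n
        · simp [hn, hk]
        · simp [hk]
      · split
        · rw [List.getElem?_set_ne (by omega)]
          simp [List.mem_cons, hkp, hmem]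
        · simp [List.mem_cons, hkp, hmem]

-- ===== VERDICT (by name: the statement is the Claim_ definition above) =====
theorem process_py_spec : Claim_equal_process_py := by
  intro aWord _
  unfold Spec_process_py process_py process_py_alt
  set cs := aWord.toList with hcs
  by_cases h6 : 6 ≤ cs.length
  · simp only [h6, if_true, if_neg (by omega : ¬ cs.length < 6)]
    congr 1
    rw [pvFoldlAppIf]
    rw [PySem.List.pyRange_one]
    simp only [sub_zero, Int.toNat_natCast, List.map_map, List.nil_append]
    apply List.ext_getElem?
    intro k
    rw [pvPatchGet (pvShift cs) cs.length _ _ rfl k]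
    by_cases hk : k < cs.length
    · rw [List.getElem?_map, List.getElem?_range hk]
      simp only [Option.map_some, Function.comp_apply, zero_add]
      have hget : PySem.List.pyGetD cs (k : Int) ' ' = cs.getD k ' ' :=
        PySem.List.pyGetD_natCast ..
      by_cases hmem : k ∈ ([1, 5, 8, 13, 21] : List Nat)
      · have hc : ((k : Int) = 1 ∨ (k : Int) = 5 ∨ (k : Int) = 8 ∨ (k : Int) = 13 ∨ (k : Int) = 21) := by
          fin_cases hmem <;> simp
        simp only [if_pos hc, pvShift, hget, Int.toNat_natCast]
        simp [hmem, hk]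
      · have hc : ¬ ((k : Int) = 1 ∨ (k : Int) = 5 ∨ (k : Int) = 8 ∨ (k : Int) = 13 ∨ (k : Int) = 21) := by
          simp only [List.mem_cons] at hmem
          omega
        simp only [if_neg hc, if_neg (by tauto : ¬ (k ∈ ([1,5,8,13,21] : List Nat) ∧ k < cs.length)), hget]
        rw [List.getD_eq_getElem?_getD, List.getElem?_eq_getElem hk]
        simp
    · have h1 : ¬ (k ∈ ([1, 5, 8, 13, 21] : List Nat) ∧ k < cs.length) := by tauto
      rw [if_neg h1, List.getElem?_eq_none (by simpa using Nat.le_of_not_lt hk),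
          List.getElem?_eq_none (Nat.le_of_not_lt hk)]
  · rw [if_neg h6, if_pos (by omega : cs.length < 6)]
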